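-- pv_equiv track=rewrite | github.com/graknol/ifs-cloud-core-mcp-server | rtx_optimizer_real_ifs_patterns.py | _get_business_context
-- ===== SOURCE A (Python) =====
-- def _get_business_context(business_terms: list) -> str:
--     """Get context from business terms with real frequency data."""
--
--     if not business_terms:
--         return None
--
--     # Focus on top terms
--     top_terms = business_terms[:5]
--
--     contexts = []
--     for term_info in top_terms:
--         term = term_info["term"]
--
--         if term in ["cost", "price", "amount", "total"]:
--             contexts.append("financial calculations")
--         elif term in ["tax", "charge", "discount"]:
--             contexts.append("pricing rules")
--         elif term in ["authorization", "approval", "workflow"]: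
--             contexts.append("approval processes")
--         elif term in ["validation", "verification"]:
--             contexts.append("data validation")
--         elif term in ["status", "state", "condition"]:
--             contexts.append("state management")
--
--     unique_contexts = list(dict.fromkeys(contexts))
--     return ", ".join(unique_contexts[:2]) if unique_contexts else None
-- ===== SOURCE B (Python) =====
-- _CATEGORIES = [
--     ("financial calculations", ("cost", "price", "amount", "total")),
--     ("pricing rules", ("tax", "charge", "discount")),
--     ("approval processes", ("authorization", "approval", "workflow")),
--     ("data validation", ("validation", "verification")),
--     ("state management", ("status", "state", "condition")),
-- ]
--
--
-- def _get_business_context(business_terms: list) -> str: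
--     """Category-major scan: first-hit index per category, then the two earliest labels."""
--     if not business_terms:
--         return None
--
--     terms = [term_info["term"] for term_info in business_terms[:5]]
--
--     # For each category, the position of its first matching term (if any).
--     hits = []
--     for label, keywords in _CATEGORIES:
--         for i, t in enumerate(terms):
--             if t in keywords:
--                 hits.append((i, label))
--                 break
--
--     if not hits:
--         return None
--
--     # Earliest-seen categories first; first-hit indices are distinct across categories.
--     hits.sort(key=lambda h: h[0])
--     return ", ".join(label for _, label in hits[:2])
-- ===== Notes on version B (the rewrite author's own statement) =====
-- stated objective: alternative
-- what changed: Inverts the traversal: instead of scanning terms and classifying each through an if/elif cascade then deduping the collected labels, B scans the five categories, computes for each the index of its first matching term, sorts the (index, label) hits by index and joins the first two labels; dedup-by-first-occurrence is replaced by argmin-per-category plus a sort.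
import Mathlib
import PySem

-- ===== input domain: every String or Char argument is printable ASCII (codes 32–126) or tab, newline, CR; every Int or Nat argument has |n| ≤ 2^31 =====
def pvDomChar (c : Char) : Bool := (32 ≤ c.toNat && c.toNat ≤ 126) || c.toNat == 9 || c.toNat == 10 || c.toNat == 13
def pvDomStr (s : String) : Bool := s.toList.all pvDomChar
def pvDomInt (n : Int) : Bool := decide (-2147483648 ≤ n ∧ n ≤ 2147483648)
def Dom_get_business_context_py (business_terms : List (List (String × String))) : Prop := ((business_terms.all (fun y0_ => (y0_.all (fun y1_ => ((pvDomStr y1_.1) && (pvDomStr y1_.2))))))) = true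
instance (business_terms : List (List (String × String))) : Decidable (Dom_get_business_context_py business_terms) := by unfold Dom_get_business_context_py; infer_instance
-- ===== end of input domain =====

-- B inverts A's traversal: categories outer, terms inner — first-hit index per category,
-- sort the (index, label) hits, join the two earliest labels (objective: alternative, same cost).


-- ===== PORT A =====
-- literal port of A: loop over the first five term_infos, if/elif membership cascade appending
-- a context per term, then list(dict.fromkeys(...)) = PySem.List.dedup, then join of [:2].
-- term_info["term"] is read via getD "" — total here; Pre_ excludes the KeyError inputs, on which Python raises.
def get_business_context_py (business_terms : List (List (String × String))) : Option String :=
  if business_terms = [] then none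
  else
    let top_terms := PySem.List.slice business_terms none (some 5)
    let contexts := top_terms.foldl (fun acc term_info =>
      let term := PySem.Dict.getD (PySem.Dict.mk term_info) "term" ""
      if term ∈ ["cost", "price", "amount", "total"] then acc ++ ["financial calculations"]
      else if term ∈ ["tax", "charge", "discount"] then acc ++ ["pricing rules"]
      else if term ∈ ["authorization", "approval", "workflow"] then acc ++ ["approval processes"]
      else if term ∈ ["validation", "verification"] then acc ++ ["data validation"]
      else if term ∈ ["status", "state", "condition"] then acc ++ ["state management"]
      else acc) []
    let unique_contexts := PySem.List.dedup contexts
    if unique_contexts = [] then none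
    else some (PySem.Str.join ", " (unique_contexts.take 2))

-- ===== PORT B =====
-- Source B's _CATEGORIES table
def pvCategories : List (String × List String) :=
  [("financial calculations", ["cost", "price", "amount", "total"]),
   ("pricing rules", ["tax", "charge", "discount"]),
   ("approval processes", ["authorization", "approval", "workflow"]),
   ("data validation", ["validation", "verification"]),
   ("state management", ["status", "state", "condition"])]

-- Source B's inner 'for i, t in enumerate(terms): if t in keywords: …; break':
-- index of the first element satisfying p
def pvFirstIdx {α : Type} (p : α → Bool) : List α → Option Nat
  | [] => none
  | x :: t => if p x then some 0 else (pvFirstIdx p t).map (· + 1)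

def get_business_context_py_alt (business_terms : List (List (String × String))) : Option String :=
  if business_terms = [] then none
  else
    let terms := (PySem.List.slice business_terms none (some 5)).map
      (fun term_info => PySem.Dict.getD (PySem.Dict.mk term_info) "term" "")
    let hits := pvCategories.foldl (fun acc lk =>
      match pvFirstIdx (fun t => t ∈ lk.2) terms with
      | some i => acc ++ [(i, lk.1)]
      | none => acc) ([] : List (Nat × String))
    if hits = [] then none
    else
      let sortedHits := PySem.List.sorted hits (fun h => h.1) false
      some (PySem.Str.join ", " ((PySem.List.slice sortedHits none (some 2)).map (fun h => h.2)))

-- ===== PRECONDITION & SPEC =====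
-- Pre_ excludes exactly the inputs on which A raises KeyError: a term_info among the first five
-- without a "term" key (B raises there too).
def Pre_get_business_context_py (business_terms : List (List (String × String))) : Prop :=
  ∀ term_info ∈ business_terms.take 5, term_info.any (fun p => p.1 == "term") = true
instance (business_terms : List (List (String × String))) : Decidable (Pre_get_business_context_py business_terms) := by unfold Pre_get_business_context_py; infer_instance

def pvWitness_get_business_context_py : (List (List (String × String))) :=
  [[("term", "cost")], [("term", "status")]]

def Spec_get_business_context_py (business_terms : List (List (String × String))) (out : Option String) : Prop := out = get_business_context_py_alt business_terms
instance (business_terms : List (List (String × String))) (out : Option String) : Decidable (Spec_get_business_context_py business_terms out) := by unfold Spec_get_business_context_py; infer_instance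

-- ===== CLAIM (what is proved, stated in full; the proofs are below) =====
def Claim_equal_get_business_context_py : Prop := ∀ (business_terms : List (List (String × String))), Dom_get_business_context_py business_terms → Pre_get_business_context_py business_terms → Spec_get_business_context_py business_terms (get_business_context_py business_terms)

-- ===== LEMMAS AND PROOFS =====

-- A's cascade as a function: the label of a term (or none)
def pvLabelOf (term : String) : Option String :=
  if term ∈ ["cost", "price", "amount", "total"] then some "financial calculations"
  else if term ∈ ["tax", "charge", "discount"] then some "pricing rules"
  else if term ∈ ["authorization", "approval", "workflow"] then some "approval processes"
  else if term ∈ ["validation", "verification"] then some "data validation"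
  else if term ∈ ["status", "state", "condition"] then some "state management"
  else none

def pvLabels : List String :=
  ["financial calculations", "pricing rules", "approval processes", "data validation", "state management"]

-- B's hits, as a flatMap over an arbitrary category list, on the label sequence fs
def pvHitsOf (cs : List (String × List String)) (fs : List (Option String)) : List (Nat × String) :=
  cs.flatMap (fun lk => ((pvFirstIdx (fun o => o == some lk.1) fs).map (fun i => (i, lk.1))).toList)

def pvShift (h : Nat × String) : Nat × String := (h.1 + 1, h.2)

-- erase every occurrence of some L
def pvErase (L : String) (fs : List (Option String)) : List (Option String) :=
  fs.map (fun o => if o == some L then none else o)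

-- the canonical (strictly index-increasing) arrangement of the hits
def pvC : List (Option String) → List (Nat × String)
  | [] => []
  | none :: t => (pvC t).map pvShift
  | some L :: t => (0, L) :: (pvC (pvErase L t)).map pvShift
termination_by fs => fs.length
decreasing_by all_goals simp [pvErase]

-- ordered dedup relative to a seen-prefix
def pvDedupFrom (seen : List String) (xs : List String) : List String :=
  match xs with
  | [] => []
  | x :: xs => if x ∈ seen then pvDedupFrom seen xs else x :: pvDedupFrom (seen ++ [x]) xs

lemma pvFoldl_add_eq (xs : List String) (seen : List String) :
    xs.foldl PySem.Set.add seen = seen ++ pvDedupFrom seen xs := by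
  induction xs generalizing seen with
  | nil => simp [pvDedupFrom]
  | cons x xs ih =>
    simp only [List.foldl_cons, pvDedupFrom]
    by_cases hx : x ∈ seen
    · rw [PySem.Set.add_of_mem hx, ih, if_pos hx]
    · rw [PySem.Set.add_of_not_mem hx, ih, if_neg hx, List.append_assoc, List.singleton_append]

lemma pvDedup_eq (xs : List String) : PySem.List.dedup xs = pvDedupFrom [] xs := by
  rw [PySem.List.dedup_eq_ofList, PySem.Set.ofList_eq_foldl]
  simpa using pvFoldl_add_eq xs []

-- pvDedupFrom only depends on the seen-prefix through membership of the list's elements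
lemma pvDedupFrom_congr (l : List String) (s₁ s₂ : List String)
    (h : ∀ x ∈ l, x ∈ s₁ ↔ x ∈ s₂) : pvDedupFrom s₁ l = pvDedupFrom s₂ l := by
  induction l generalizing s₁ s₂ with
  | nil => rfl
  | cons x l ih =>
    simp only [pvDedupFrom]
    have hx := h x (by simp)
    by_cases h1 : x ∈ s₁
    · rw [if_pos h1, if_pos (hx.mp h1)]
      exact ih s₁ s₂ (fun y hy => h y (by simp [hy]))
    · rw [if_neg h1, if_neg (fun h2 => h1 (hx.mpr h2))]
      congr 1
      exact ih (s₁ ++ [x]) (s₂ ++ [x]) (fun y hy => by simp [h y (by simp [hy])])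

-- elements already seen may be filtered out
lemma pvDedupFrom_filter (l : List String) (seen : List String) (a : String) (ha : a ∈ seen) :
    pvDedupFrom seen l = pvDedupFrom seen (l.filter (fun x => decide (x ≠ a))) := by
  induction l generalizing seen with
  | nil => rfl
  | cons x l ih =>
    rw [List.filter_cons]
    by_cases hxa : x = a
    · subst hxa
      rw [if_neg (by simp)]
      simp only [pvDedupFrom]
      rw [if_pos ha]
      exact ih seen ha
    · rw [if_pos (by simp [hxa])]
      simp only [pvDedupFrom]
      by_cases hx : x ∈ seen
      · rw [if_pos hx, if_pos hx]; exact ih seen ha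
      · rw [if_neg hx, if_neg hx]
        congr 1
        exact ih (seen ++ [x]) (by simp [ha])

-- dedup of a cons: head, then dedup of the tail with the head removed
lemma pvDedup_cons (a : String) (l : List String) :
    PySem.List.dedup (a :: l) = a :: PySem.List.dedup (l.filter (fun x => decide (x ≠ a))) := by
  rw [pvDedup_eq, pvDedup_eq]
  simp only [pvDedupFrom, List.not_mem_nil, if_false]
  congr 1
  simp only [List.nil_append]
  rw [pvDedupFrom_filter l [a] a (by simp)]
  apply pvDedupFrom_congr
  intro y hy
  have : y ≠ a := by
    have := List.of_mem_filter hy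
    simpa using this
  simp [this]

-- ===== pvFirstIdx facts =====
lemma pvFirstIdx_map {α β : Type} (p : β → Bool) (f : α → β) (l : List α) :
    pvFirstIdx p (l.map f) = pvFirstIdx (fun x => p (f x)) l := by
  induction l with
  | nil => rfl
  | cons x l ih => simp [pvFirstIdx, ih]

lemma pvFirstIdx_congr {α : Type} (p q : α → Bool) (l : List α)
    (h : ∀ x ∈ l, p x = q x) : pvFirstIdx p l = pvFirstIdx q l := by
  induction l with
  | nil => rfl
  | cons x l ih =>
    simp only [pvFirstIdx, h x (by simp)]
    rw [ih (fun y hy => h y (by simp [hy]))]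

lemma pvFirstIdx_eq_none {α : Type} (p : α → Bool) (l : List α)
    (h : ∀ x ∈ l, p x = false) : pvFirstIdx p l = none := by
  induction l with
  | nil => rfl
  | cons x l ih =>
    simp only [pvFirstIdx, h x (by simp)]
    rw [if_neg (by simp), ih (fun y hy => h y (by simp [hy]))]
    rfl

-- erasing L is invisible to the search for M ≠ L
lemma pvFirstIdx_erase (M L : String) (hML : M ≠ L) (t : List (Option String)) :
    pvFirstIdx (fun o => o == some M) (pvErase L t) = pvFirstIdx (fun o => o == some M) t := by
  unfold pvErase
  rw [pvFirstIdx_map]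
  exact pvFirstIdx_congr _ _ t (fun o _ => by
    by_cases hL : o = some L
    · subst hL; simp [Ne.symm hML]
    · simp [hL])

lemma pvFirstIdx_erase_self (L : String) (t : List (Option String)) :
    pvFirstIdx (fun o => o == some L) (pvErase L t) = none := by
  apply pvFirstIdx_eq_none
  intro o ho
  simp only [pvErase, List.mem_map] at ho
  obtain ⟨x, _, rfl⟩ := ho
  by_cases hx : x = some L <;> simp [hx]

-- ===== pvHitsOf structure =====
lemma pvHitsOf_append (cs ds : List (String × List String)) (fs : List (Option String)) :
    pvHitsOf (cs ++ ds) fs = pvHitsOf cs fs ++ pvHitsOf ds fs := by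
  simp [pvHitsOf]

lemma pvHitsOf_none (cs : List (String × List String)) (t : List (Option String)) :
    pvHitsOf cs (none :: t) = (pvHitsOf cs t).map pvShift := by
  simp only [pvHitsOf, List.map_flatMap]
  apply List.flatMap_congr
  intro lk _
  simp only [pvFirstIdx]
  rw [if_neg (by simp)]
  cases pvFirstIdx (fun o => o == some lk.1) t <;> simp [pvShift]

-- for a category list whose labels avoid L, a head some L just shifts the hits of the erased tail
lemma pvHitsOf_cons_ne (cs : List (String × List String)) (L : String)
    (h : ∀ lk ∈ cs, lk.1 ≠ L) (t : List (Option String)) :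
    pvHitsOf cs (some L :: t) = (pvHitsOf cs (pvErase L t)).map pvShift := by
  simp only [pvHitsOf, List.map_flatMap]
  apply List.flatMap_congr
  intro lk hlk
  simp only [pvFirstIdx]
  rw [if_neg (by simp [Ne.symm (h lk hlk)])]
  rw [pvFirstIdx_erase lk.1 L (h lk hlk) t]
  cases pvFirstIdx (fun o => o == some lk.1) t <;> simp [pvShift]

-- ===== the three facts about pvC =====
lemma pvC_pairwise (fs : List (Option String)) :
    (pvC fs).Pairwise (fun a b => a.1 < b.1) := by
  fun_induction pvC fs with
  | case1 => simp
  | case2 t ih =>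
    exact List.Pairwise.map _ (fun a b h => by simp only [pvShift]; omega) ih
  | case3 L t ih =>
    constructor
    · intro h hh
      simp only [List.mem_map] at hh
      obtain ⟨x, _, rfl⟩ := hh
      simp [pvShift]
    · exact List.Pairwise.map _ (fun a b h => by simp only [pvShift]; omega) ih

lemma pvErase_flatMap (L : String) (t : List (Option String)) :
    (pvErase L t).flatMap Option.toList
      = (t.flatMap Option.toList).filter (fun x => decide (x ≠ L)) := by
  induction t with
  | nil => rfl
  | cons o t iht =>
    simp only [pvErase, List.map_cons, List.flatMap_cons, List.filter_append]
    simp only [pvErase] at iht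
    rw [iht]
    congr 1
    by_cases hL2 : o = some L
    · subst hL2; simp
    · cases o with
      | none => simp
      | some M =>
        have hM : M ≠ L := fun h => hL2 (by rw [h])
        simp [hM]

lemma pvC_map_snd (fs : List (Option String)) :
    (pvC fs).map (fun h => h.2) = PySem.List.dedup (fs.flatMap Option.toList) := by
  fun_induction pvC fs with
  | case1 => simp [PySem.List.dedup]
  | case2 t ih =>
    simp only [List.map_map]
    rw [show ((fun h : Nat × String => h.2) ∘ pvShift) = (fun h : Nat × String => h.2) by
      funext h; simp [pvShift]]
    simpa using ih
  | case3 L t ih =>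
    simp only [List.map_cons, List.map_map]
    rw [show ((fun h : Nat × String => h.2) ∘ pvShift) = (fun h : Nat × String => h.2) by
      funext h; simp [pvShift]]
    rw [ih]
    have hflat := pvErase_flatMap L t
    rw [hflat]
    simp only [List.flatMap_cons, Option.toList]
    exact (pvDedup_cons L _).symm

-- the permutation: hits of the full category table ~ pvC, for label sequences over pvLabels
lemma pvHitsOf_perm (fs : List (Option String))
    (hval : ∀ x, some x ∈ fs → x ∈ pvLabels) :
    (pvHitsOf pvCategories fs).Perm (pvC fs) := by
  fun_induction pvC fs with
  | case1 => simp [pvHitsOf, pvCategories, pvFirstIdx]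
  | case2 t ih =>
    rw [pvHitsOf_none]
    exact (ih (fun x hx => hval x (by simp [hx]))).map pvShift
  | case3 L t ih =>
    have hL : L ∈ pvLabels := hval L (by simp)
    have hval2 : ∀ x, some x ∈ pvErase L t → x ∈ pvLabels := by
      intro x hx
      simp only [pvErase, List.mem_map] at hx
      obtain ⟨o, ho, heq⟩ := hx
      by_cases h : o = some L
      · rw [h] at heq; simp at heq
      · rw [if_neg (by simpa using h)] at heq
        exact hval x (by rw [← heq]; simp [ho])
    have ihp : ((pvHitsOf pvCategories (pvErase L t)).map pvShift).Perm
        ((pvC (pvErase L t)).map pvShift) := (ih hval2).map pvShift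
    have key : ∀ (pre suf : List (String × List String)) (kws : List String),
        pvCategories = pre ++ (L, kws) :: suf →
        (∀ lk ∈ pre, lk.1 ≠ L) → (∀ lk ∈ suf, lk.1 ≠ L) →
        (pvHitsOf pvCategories (some L :: t)).Perm
          ((0, L) :: (pvHitsOf pvCategories (pvErase L t)).map pvShift) := by
      intro pre suf kws hdec hpre hsuf
      have hsplit : pvCategories = pre ++ [(L, kws)] ++ suf := by simpa using hdec
      rw [hsplit, pvHitsOf_append, pvHitsOf_append]
      have hmid : pvHitsOf [(L, kws)] (some L :: t) = [(0, L)] := by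
        simp [pvHitsOf, pvFirstIdx]
      have hmid2 : pvHitsOf [(L, kws)] (pvErase L t) = [] := by
        simp [pvHitsOf, pvFirstIdx_erase_self]
      rw [hmid, pvHitsOf_cons_ne pre L hpre, pvHitsOf_cons_ne suf L hsuf]
      have : (0, L) :: ((pvHitsOf pre (pvErase L t)).map pvShift
              ++ (pvHitsOf suf (pvErase L t)).map pvShift)
          = (0, L) :: (pvHitsOf (pre ++ [(L, kws)] ++ suf) (pvErase L t)).map pvShift := by
        rw [pvHitsOf_append, pvHitsOf_append, hmid2]
        simp
      have h1 : ((pvHitsOf pre (pvErase L t)).map pvShift ++ ((0, L)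
              :: (pvHitsOf suf (pvErase L t)).map pvShift)).Perm
          ((0, L) :: ((pvHitsOf pre (pvErase L t)).map pvShift
              ++ (pvHitsOf suf (pvErase L t)).map pvShift)) := List.perm_middle
      rw [show (pvHitsOf pre (pvErase L t)).map pvShift ++ [(0, L)]
              ++ (pvHitsOf suf (pvErase L t)).map pvShift
          = (pvHitsOf pre (pvErase L t)).map pvShift ++ ((0, L)
              :: (pvHitsOf suf (pvErase L t)).map pvShift) by simp]
      rw [this] at h1
      exact h1
    have goal2 : (pvHitsOf pvCategories (some L :: t)).Perm
        ((0, L) :: (pvC (pvErase L t)).map pvShift) := by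
      simp only [pvLabels, List.mem_cons, List.not_mem_nil, or_false] at hL
      rcases hL with rfl | rfl | rfl | rfl | rfl
      · exact (key [] _ _ rfl (by simp) (by decide)).trans (List.Perm.cons _ ihp)
      · exact (key [("financial calculations", ["cost", "price", "amount", "total"])] _ _ rfl
          (by decide) (by decide)).trans (List.Perm.cons _ ihp)
      · exact (key [("financial calculations", ["cost", "price", "amount", "total"]),
          ("pricing rules", ["tax", "charge", "discount"])] _ _ rfl
          (by decide) (by decide)).trans (List.Perm.cons _ ihp)
      · exact (key [("financial calculations", ["cost", "price", "amount", "total"]),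
          ("pricing rules", ["tax", "charge", "discount"]),
          ("approval processes", ["authorization", "approval", "workflow"])] _ _ rfl
          (by decide) (by decide)).trans (List.Perm.cons _ ihp)
      · exact (key [("financial calculations", ["cost", "price", "amount", "total"]),
          ("pricing rules", ["tax", "charge", "discount"]),
          ("approval processes", ["authorization", "approval", "workflow"]),
          ("data validation", ["validation", "verification"])] _ _ rfl
          (by decide) (by simp)).trans (List.Perm.cons _ ihp)
    exact goal2

-- A's cascade test for a category agrees with B's keyword membership
lemma pvMem_label (lk : String × List String) (hlk : lk ∈ pvCategories) (s : String) :
    (decide (s ∈ lk.2)) = (pvLabelOf s == some lk.1) := by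
  simp only [pvCategories, List.mem_cons, List.not_mem_nil, or_false] at hlk
  rcases hlk with rfl | rfl | rfl | rfl | rfl
  · by_cases h : s ∈ (["cost", "price", "amount", "total"] : List String)
    · rcases (show s = "cost" ∨ s = "price" ∨ s = "amount" ∨ s = "total" by simpa using h)
        with rfl | rfl | rfl | rfl <;> decide
    · simp only [pvLabelOf]; split_ifs <;> simp_all
  · by_cases h : s ∈ (["tax", "charge", "discount"] : List String)
    · rcases (show s = "tax" ∨ s = "charge" ∨ s = "discount" by simpa using h)
        with rfl | rfl | rfl <;> decide
    · simp only [pvLabelOf]; split_ifs <;> simp_all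
  · by_cases h : s ∈ (["authorization", "approval", "workflow"] : List String)
    · rcases (show s = "authorization" ∨ s = "approval" ∨ s = "workflow" by simpa using h)
        with rfl | rfl | rfl <;> decide
    · simp only [pvLabelOf]; split_ifs <;> simp_all
  · by_cases h : s ∈ (["validation", "verification"] : List String)
    · rcases (show s = "validation" ∨ s = "verification" by simpa using h)
        with rfl | rfl <;> decide
    · simp only [pvLabelOf]; split_ifs <;> simp_all
  · by_cases h : s ∈ (["status", "state", "condition"] : List String)
    · rcases (show s = "status" ∨ s = "state" ∨ s = "condition" by simpa using h)
        with rfl | rfl | rfl <;> decide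
    · simp only [pvLabelOf]; split_ifs <;> simp_all

lemma pvLabelOf_mem (s x : String) (h : pvLabelOf s = some x) : x ∈ pvLabels := by
  simp only [pvLabelOf] at h
  split_ifs at h <;> simp_all [pvLabels]

-- A's loop, by induction: it appends the label of each term
lemma pvAfold (tis : List (List (String × String))) (acc : List String) :
    tis.foldl (fun acc term_info =>
        let term := PySem.Dict.getD (PySem.Dict.mk term_info) "term" ""
        if term ∈ ["cost", "price", "amount", "total"] then acc ++ ["financial calculations"]
        else if term ∈ ["tax", "charge", "discount"] then acc ++ ["pricing rules"]
        else if term ∈ ["authorization", "approval", "workflow"] then acc ++ ["approval processes"]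
        else if term ∈ ["validation", "verification"] then acc ++ ["data validation"]
        else if term ∈ ["status", "state", "condition"] then acc ++ ["state management"]
        else acc) acc
      = acc ++ (tis.map (fun ti =>
          pvLabelOf (PySem.Dict.getD (PySem.Dict.mk ti) "term" ""))).flatMap Option.toList := by
  induction tis generalizing acc with
  | nil => simp
  | cons ti tis ih =>
    rw [List.foldl_cons, ih]
    simp only [List.map_cons, List.flatMap_cons, pvLabelOf]
    split_ifs <;> simp

-- B's loop, by induction over the category rows (each row from pvCategories)
lemma pvBfold (cs : List (String × List String)) (hcs : ∀ lk ∈ cs, lk ∈ pvCategories)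
    (terms : List String) (acc : List (Nat × String)) :
    cs.foldl (fun acc lk =>
        match pvFirstIdx (fun t => t ∈ lk.2) terms with
        | some i => acc ++ [(i, lk.1)]
        | none => acc) acc
      = acc ++ pvHitsOf cs (terms.map pvLabelOf) := by
  induction cs generalizing acc with
  | nil => simp [pvHitsOf]
  | cons lk cs ih =>
    rw [List.foldl_cons, ih (fun x hx => hcs x (List.mem_cons_of_mem _ hx))]
    have hidx : pvFirstIdx (fun t => t ∈ lk.2) terms
        = pvFirstIdx (fun o => o == some lk.1) (terms.map pvLabelOf) := by
      rw [pvFirstIdx_map]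
      exact pvFirstIdx_congr _ _ terms (fun s _ => pvMem_label lk (hcs lk (by simp)) s)
    rw [hidx]
    simp only [pvHitsOf, List.flatMap_cons]
    cases pvFirstIdx (fun o => o == some lk.1) (terms.map pvLabelOf) <;> simp


-- ===== VERDICT (by name: the statement is the Claim_ definition above) =====
theorem get_business_context_py_spec : Claim_equal_get_business_context_py := by
  intro bt _ _
  unfold Spec_get_business_context_py get_business_context_py get_business_context_py_alt
  by_cases hbt : bt = []
  · simp [hbt]
  · rw [if_neg hbt, if_neg hbt]
    have hA := pvAfold (PySem.List.slice bt none (some 5)) []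
    have hB := pvBfold pvCategories (fun lk hlk => hlk)
      ((PySem.List.slice bt none (some 5)).map
        (fun ti => PySem.Dict.getD (PySem.Dict.mk ti) "term" "")) []
    simp only [List.nil_append] at hA hB
    simp only [List.map_map, Function.comp_def] at hB
    dsimp only
    rw [hA, hB]
    set fs := (PySem.List.slice bt none (some 5)).map
      (fun ti => pvLabelOf (PySem.Dict.getD (PySem.Dict.mk ti) "term" "")) with hfs
    have hval : ∀ x, some x ∈ fs → x ∈ pvLabels := by
      intro x hx
      rw [hfs] at hx
      simp only [List.mem_map] at hx
      obtain ⟨s, _, hs⟩ := hx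
      exact pvLabelOf_mem _ x hs
    have hperm := pvHitsOf_perm fs hval
    have hsorted : PySem.List.sorted (pvHitsOf pvCategories fs) (fun h => h.1) false = pvC fs :=
      PySem.List.sorted_eq_of_perm_of_pairwise_lt (pvHitsOf pvCategories fs) (pvC fs) (fun h => h.1) hperm.symm (pvC_pairwise fs)
    have hdedup : PySem.List.dedup (fs.flatMap Option.toList) = (pvC fs).map (fun h => h.2) :=
      (pvC_map_snd fs).symm
    rw [hdedup, hsorted]
    by_cases hC : pvC fs = []
    · rw [if_pos (by simp [hC]), if_pos (List.Perm.eq_nil (hC ▸ hperm))]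
    · rw [if_neg (by simp [hC]), if_neg (fun h => hC ((h ▸ hperm).symm.eq_nil))]
      simp [PySem.List.slice_to, List.map_take]
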